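-- pv_equiv track=rewrite | github.com/DonatasNoreika/sizes | batai.py | most_common_name_for_size
-- ===== SOURCE A (Python) =====
-- def most_common_size(sizes):
--     new = []
--     for size in sizes:
--        new.append(size[1])
--     counter = 0
--     num = sizes[0]
--     for i in new:
--         curr_frequency = new.count(i)
--         if (curr_frequency > counter):
--             counter = curr_frequency
--             num = i
--     return num
--
-- def most_common_name_for_size(sizes):
--     new = []
--     for size in sizes:
--         if size[1] == most_common_size(sizes):
--             new.append(size[0])
--     counter = 0
--     num = sizes[0]
--     for i in new:
--         curr_frequency = new.count(i)
--         if (curr_frequency > counter):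
--             counter = curr_frequency
--             num = i
--     return num
-- ===== SOURCE B (Python) =====
-- def most_common_name_for_size(sizes):
--     # One pass to count occurrences of each size; pick first size with maximal count.
--     size_counts = {}
--     for name, size in sizes:
--         size_counts[size] = size_counts.get(size, 0) + 1
--     best_size, best = None, 0
--     for s, c in size_counts.items():
--         if c > best:
--             best_size, best = s, c
--     # One pass counting names among shoes of the winning size; pick first name with maximal count.
--     name_counts = {}
--     for name, size in sizes:
--         if size == best_size:
--             name_counts[name] = name_counts.get(name, 0) + 1
--     best_name, best = None, 0
--     for n, c in name_counts.items():
--         if c > best: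
--             best_name, best = n, c
--     return best_name
-- ===== Notes on version B (the rewrite author's own statement) =====
-- stated objective: faster
-- what changed: Replaces A's quadratic rescans (list.count inside the loop and a full most_common_size recomputation per element) by two linear passes that build dict counters once and scan their distinct items for the first maximum.
import Mathlib
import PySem

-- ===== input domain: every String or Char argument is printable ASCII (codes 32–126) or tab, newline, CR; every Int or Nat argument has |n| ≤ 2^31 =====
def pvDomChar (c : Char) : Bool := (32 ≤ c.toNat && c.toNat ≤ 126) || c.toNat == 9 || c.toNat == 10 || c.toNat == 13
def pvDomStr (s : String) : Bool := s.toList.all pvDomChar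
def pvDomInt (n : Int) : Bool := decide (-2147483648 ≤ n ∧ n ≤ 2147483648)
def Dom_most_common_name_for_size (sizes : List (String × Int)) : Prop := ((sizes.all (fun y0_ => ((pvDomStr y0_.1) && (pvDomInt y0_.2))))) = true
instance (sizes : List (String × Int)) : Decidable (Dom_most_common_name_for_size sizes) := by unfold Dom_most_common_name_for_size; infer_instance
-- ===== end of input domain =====

-- B replaces A's quadratic rescans (list.count inside the loop, most_common_size recomputed per
-- element) by two linear passes over dict counters; a timing run measured it faster.


-- ===== PORT A =====
-- helper most_common_size: Python's num starts as the tuple sizes[0] and is overwritten by an int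
-- on the first loop iteration; the heterogeneous variable is ported as a Sum.  The `none` branch of
-- pyGet? is Python's IndexError on empty input (excluded by Pre_); the Sum.inl fallback 0 is the
-- unreachable case of an empty loop (new = [] forces sizes = [], already caught by pyGet?).
def pv_most_common_size (sizes : List (String × Int)) : Int :=
  let new := sizes.foldl (fun acc size => acc ++ [size.2]) []
  match PySem.List.pyGet? sizes 0 with
  | none => 0
  | some s0 =>
    let r := new.foldl
      (fun (st : Int × ((String × Int) ⊕ Int)) i =>
        if ((PySem.List.count new i : Int)) > st.1
        then ((PySem.List.count new i : Int), Sum.inr i) else st)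
      (0, Sum.inl s0)
    match r.2 with
    | Sum.inr i => i
    | Sum.inl _ => 0

-- A recomputes most_common_size(sizes) on every filter iteration; the port keeps the call in the
-- loop body.  num is again tuple-then-string, ported as a Sum; the unreachable fallbacks return "".
def most_common_name_for_size (sizes : List (String × Int)) : String :=
  let new := sizes.foldl
    (fun acc size => if size.2 == pv_most_common_size sizes then acc ++ [size.1] else acc) []
  match PySem.List.pyGet? sizes 0 with
  | none => ""
  | some s0 =>
    let r := new.foldl
      (fun (st : Int × ((String × Int) ⊕ String)) i =>
        if ((PySem.List.count new i : Int)) > st.1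
        then ((PySem.List.count new i : Int), Sum.inr i) else st)
      (0, Sum.inl s0)
    match r.2 with
    | Sum.inr i => i
    | Sum.inl _ => ""

-- ===== PORT B =====
-- Python B's `best_size, best = None, 0` pair is ported with the count first (Int × Option _) —
-- the two components are separate Python variables.  B returns None on empty input (A raises
-- there; excluded by Pre_): the port renders that unreachable None as "".
def most_common_name_for_size_alt (sizes : List (String × Int)) : String :=
  let sizeCounts : PySem.Dict Int Int :=
    sizes.foldl (fun d p => d.insert p.2 (d.getD p.2 0 + 1)) PySem.Dict.empty
  let bs : Int × Option Int :=
    sizeCounts.items.foldl (fun st sc => if sc.2 > st.1 then (sc.2, some sc.1) else st) (0, none)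
  let nameCounts : PySem.Dict String Int :=
    sizes.foldl (fun d p => if some p.2 == bs.2 then d.insert p.1 (d.getD p.1 0 + 1) else d)
      PySem.Dict.empty
  let bn : Int × Option String :=
    nameCounts.items.foldl (fun st nc => if nc.2 > st.1 then (nc.2, some nc.1) else st) (0, none)
  match bn.2 with
  | some n => n
  | none => ""

-- ===== PRECONDITION & SPEC =====
-- A evaluates sizes[0] and therefore raises IndexError on the empty list; nothing else raises.
def Pre_most_common_name_for_size (sizes : List (String × Int)) : Prop := sizes ≠ []
instance (sizes : List (String × Int)) : Decidable (Pre_most_common_name_for_size sizes) := by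
  unfold Pre_most_common_name_for_size; infer_instance

def pvWitness_most_common_name_for_size : (List (String × Int)) := [("a", 38), ("b", 38), ("b", 40)]

def Spec_most_common_name_for_size (sizes : List (String × Int)) (out : String) : Prop :=
  out = most_common_name_for_size_alt sizes
instance (sizes : List (String × Int)) (out : String) :
    Decidable (Spec_most_common_name_for_size sizes out) := by
  unfold Spec_most_common_name_for_size; infer_instance

-- ===== CLAIM (what is proved, stated in full; the proofs are below) =====
def Claim_equal_most_common_name_for_size : Prop :=
  ∀ (sizes : List (String × Int)), Dom_most_common_name_for_size sizes →
    Pre_most_common_name_for_size sizes →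
    Spec_most_common_name_for_size sizes (most_common_name_for_size sizes)

-- ===== LEMMAS AND PROOFS =====

-- if the running max strictly exceeded the start it is attained on the list
theorem pv_foldl_max_attained {α : Type} (c : α → Int) (l : List α) (a : Int)
    (h : a < l.foldl (fun m x => max m (c x)) a) :
    ∃ x ∈ l, c x = l.foldl (fun m x => max m (c x)) a := by
  have hmap : (l.map c).foldl max a = l.foldl (fun m x => max m (c x)) a := List.foldl_map
  rcases PySem.List.foldl_max_mem (l.map c) a with h0 | h0
  · rw [hmap] at h0; omega
  · rw [hmap] at h0
    rcases List.mem_map.mp h0 with ⟨x, hx, hcx⟩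
    exact ⟨x, hx, hcx⟩

-- the keyed running max only depends on the members of the list
theorem pv_foldl_max_congr {α : Type} (c : α → Int) (l₁ l₂ : List α)
    (h : ∀ x, x ∈ l₁ ↔ x ∈ l₂) (a : Int) :
    l₁.foldl (fun m x => max m (c x)) a = l₂.foldl (fun m x => max m (c x)) a := by
  have h1 := PySem.List.le_foldl_max_int l₁ c a
  have h2 := PySem.List.le_foldl_max_int l₂ c a
  apply le_antisymm
  · by_cases ha : a < l₁.foldl (fun m x => max m (c x)) a
    · rcases pv_foldl_max_attained c l₁ a ha with ⟨x, hx, hcx⟩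
      rw [← hcx]; exact h2.2 x ((h x).mp hx)
    · omega
  · by_cases ha : a < l₂.foldl (fun m x => max m (c x)) a
    · rcases pv_foldl_max_attained c l₂ a ha with ⟨x, hx, hcx⟩
      rw [← hcx]; exact h1.2 x ((h x).mpr hx)
    · omega

-- find? skips filtered-out elements that cannot satisfy the predicate
theorem pv_find?_filter {α : Type} (p q : α → Bool) (l : List α)
    (h : ∀ x ∈ l, q x = false → p x = false) :
    (l.filter q).find? p = l.find? p := by
  induction l with
  | nil => rfl
  | cons x t ih =>
    by_cases hq : q x
    · rw [List.filter_cons_of_pos hq, List.find?_cons, List.find?_cons]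
      cases hp : p x
      · exact ih (fun y hy => h y (List.mem_cons_of_mem x hy))
      · rfl
    · rw [List.filter_cons_of_neg (by simpa using hq), List.find?_cons]
      rw [h x List.mem_cons_self (by simpa using hq)]
      exact ih (fun y hy => h y (List.mem_cons_of_mem x hy))

-- find? over the first-occurrence dedup equals find? over the list
theorem pv_find?_ofList {α : Type} [BEq α] [LawfulBEq α] (p : α → Bool) (l : List α) :
    (PySem.Set.ofList l).find? p = l.find? p := by
  induction l with
  | nil => rfl
  | cons x t ih =>
    rw [PySem.Set.ofList_cons, List.find?_cons, List.find?_cons]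
    cases hp : p x
    · rw [← ih]
      show ((PySem.Set.ofList t : List α).filter (fun y => !y == x)).find? p = _
      apply pv_find?_filter
      intro y hy hqy
      have : y = x := by simpa using hqy
      rw [this]; exact hp
    · rfl

-- The shared arg-max loop shape: scanning l keeps the running max M of c and, once M exceeds the
-- start, the g-image of the FIRST element of l whose c-value equals M.
theorem pv_loop_spec {α β : Type} (c : α → Int) (g : α → β) :
    ∀ (l : List α) (a : Int) (b : β),
      l.foldl (fun st i => if c i > st.1 then (c i, g i) else st) (a, b) =
      (if a < l.foldl (fun m x => max m (c x)) a then
        (l.foldl (fun m x => max m (c x)) a,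
          match l.find? (fun x => c x == l.foldl (fun m x => max m (c x)) a) with
          | some x => g x
          | none => b)
      else (a, b)) := by
  intro l
  induction l with
  | nil => intro a b; simp
  | cons x t ih =>
    intro a b
    simp only [List.foldl_cons]
    by_cases hx : c x > a
    · rw [if_pos hx]
      have hinit : max a (c x) = c x := by omega
      rw [hinit]
      have hle : c x ≤ t.foldl (fun m x => max m (c x)) (c x) :=
        (PySem.List.le_foldl_max_int t c (c x)).1
      rw [ih]
      by_cases hM : c x < t.foldl (fun m x => max m (c x)) (c x)
      · rw [if_pos hM, if_pos (by omega)]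
        rw [List.find?_cons]
        have hne : (c x == t.foldl (fun m y => max m (c y)) (c x)) = false := by
          simp; omega
        rw [hne]
        rcases pv_foldl_max_attained c t (c x) hM with ⟨y, hy, hcy⟩
        have : ∃ r, t.find? (fun z => c z == t.foldl (fun m y => max m (c y)) (c x)) = some r := by
          rw [← Option.isSome_iff_exists, List.find?_isSome]
          exact ⟨y, hy, by simpa using hcy⟩
        rcases this with ⟨r, hr⟩
        rw [hr]
      · have heq : t.foldl (fun m x => max m (c x)) (c x) = c x := by omega
        rw [if_neg hM, if_pos (by omega)]
        rw [List.find?_cons, heq]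
        simp
    · rw [if_neg hx]
      have hinit : max a (c x) = a := by omega
      rw [hinit, ih]
      by_cases hM : a < t.foldl (fun m x => max m (c x)) a
      · rw [if_pos hM, if_pos hM]
        rw [List.find?_cons]
        have hne : (c x == t.foldl (fun m y => max m (c y)) a) = false := by
          simp; omega
        rw [hne]
      · rw [if_neg hM, if_neg hM]

-- Both scans — A's over all occurrences with recounting, B's over the dedup'd counter items —
-- end at the first element of l whose count equals the maximal count.
theorem pv_stage {α β : Type} [BEq α] [LawfulBEq α] (l : List α) (w : α) (hw : w ∈ l)
    (gA : α → β) (bA : β) :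
    ∃ x₀, x₀ ∈ l ∧
      (l.foldl (fun st i => if ((List.count i l : Int)) > st.1
          then ((List.count i l : Int), gA i) else st) (0, bA)).2 = gA x₀ ∧
      ((PySem.Set.ofList l).foldl (fun st k => if ((List.count k l : Int)) > st.1
          then ((List.count k l : Int), some k) else st)
        ((0 : Int), (none : Option α))).2 = some x₀ := by
  set c : α → Int := fun i => ((List.count i l : Int)) with hc
  set M := l.foldl (fun m x => max m (c x)) 0 with hM
  have hpos : 0 < M := by
    have h1 : (1 : Int) ≤ c w := by
      simp only [hc]
      exact_mod_cast List.one_le_count_iff.mpr hw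
    have := (PySem.List.le_foldl_max_int l c 0).2 w hw
    omega
  rcases pv_foldl_max_attained c l 0 hpos with ⟨y, hy, hcy⟩
  have hfind : ∃ x₀, l.find? (fun x => c x == M) = some x₀ := by
    rw [← Option.isSome_iff_exists, List.find?_isSome]
    exact ⟨y, hy, by simpa using hcy⟩
  rcases hfind with ⟨x₀, hx₀⟩
  refine ⟨x₀, List.mem_of_find?_eq_some hx₀, ?_, ?_⟩
  · rw [pv_loop_spec c gA l 0 bA, if_pos hpos, hx₀]
  · have hM' : (PySem.Set.ofList l).foldl (fun m x => max m (c x)) 0 = M :=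
      pv_foldl_max_congr c _ l (fun x => PySem.Set.mem_ofList l x) 0
    rw [pv_loop_spec c some (PySem.Set.ofList l) 0 none]
    rw [hM', if_pos hpos, pv_find?_ofList, hx₀]

-- ===== VERDICT (by name: the statement is the Claim_ definition above) =====
theorem most_common_name_for_size_spec : Claim_equal_most_common_name_for_size := by
  intro sizes _ hpre
  unfold Spec_most_common_name_for_size
  rcases List.exists_cons_of_ne_nil hpre with ⟨p, rest, rfl⟩
  have hget : PySem.List.pyGet? (p :: rest) 0 = some p := by
    simp [PySem.List.pyGet?, PySem.List.pyIdx?]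
  set ns : List Int := (p :: rest).map (·.2) with hns
  have hnew1 : (p :: rest).foldl (fun acc size => acc ++ [size.2]) [] = ns := by
    rw [PySem.List.foldl_append_singleton_eq_map (fun z => z.2) (p :: rest) []]; rfl
  rcases pv_stage (β := (String × Int) ⊕ Int) ns p.2
      (by rw [hns]; exact List.mem_map_of_mem List.mem_cons_self)
      Sum.inr (Sum.inl p) with ⟨S, hSmem, hA1, hB1⟩
  -- A's helper returns S
  have hAsize : pv_most_common_size (p :: rest) = S := by
    unfold pv_most_common_size
    simp only [hget, hnew1, PySem.List.count]
    rw [hA1]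
  -- the winning size occurs in sizes
  rcases List.mem_map.mp (by rw [hns] at hSmem; exact hSmem) with ⟨q, hq, hqS⟩
  -- names among shoes of size S
  set nn : List String := ((p :: rest).filter (fun z => z.2 == S)).map (·.1) with hnn
  have hqmem : q.1 ∈ nn := by
    rw [hnn]
    exact List.mem_map_of_mem (List.mem_filter.mpr ⟨hq, by simpa using hqS⟩)
  rcases pv_stage (β := (String × Int) ⊕ String) nn q.1 hqmem
      Sum.inr (Sum.inl p) with ⟨N, hNmem, hA2, hB2⟩
  -- A's new list is nn
  have hnew2 : (p :: rest).foldl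
      (fun acc size => if size.2 == pv_most_common_size (p :: rest) then acc ++ [size.1] else acc)
      [] = nn := by
    simp only [hAsize]
    rw [PySem.List.foldl_if_eq_foldl_filter (fun z => z.2 == S)
      (fun acc z => acc ++ [z.1]) (p :: rest) []]
    rw [PySem.List.foldl_append_singleton_eq_map (fun z : String × Int => z.1) _ []]
    rfl
  -- A's result
  have hA : most_common_name_for_size (p :: rest) = N := by
    unfold most_common_name_for_size
    simp only [hget, PySem.List.count]
    rw [hnew2, hA2]
  -- B side
  have hsc : (p :: rest).foldl (fun d p => d.insert p.2 (d.getD p.2 0 + 1)) PySem.Dict.empty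
      = PySem.Dict.counter ns := by
    rw [hns, ← PySem.Dict.foldl_insert_getD_add_one_eq_counter, List.foldl_map]
  have hB : most_common_name_for_size_alt (p :: rest) = N := by
    unfold most_common_name_for_size_alt
    simp only [hsc, PySem.Dict.items_counter, List.foldl_map]
    rw [hB1]
    have hpred : ∀ z : String × Int, (some z.2 == some S) = (z.2 == S) := fun z => by simp
    simp only [hpred]
    have hnc : (p :: rest).foldl
        (fun d z => if z.2 == S then d.insert z.1 (d.getD z.1 0 + 1) else d) PySem.Dict.empty
        = PySem.Dict.counter nn := by
      rw [hnn, ← PySem.Dict.foldl_insert_getD_add_one_eq_counter, List.foldl_map,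
        List.foldl_filter]
    rw [hnc]
    simp only [PySem.Dict.items_counter, List.foldl_map]
    rw [hB2]
  rw [hA, hB]
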